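-- pv_equiv track=rewrite | github.com/MikolajSuchan/pp1 | 09-Test2/p3.py | f
-- ===== SOURCE A (Python) =====
-- def f(array2D):
--     count=0
--     last=0
--     lista=[]
--     for i in array2D:
--         d=sum(i)
--         lista.append(d)
--     c=min(lista)
--     for j in lista:
--         if j==c:
--             return count
--         else:
--             count+=1
-- ===== SOURCE B (Python) =====
-- def f(array2D):
--     # single backward pass, no intermediate list of sums:
--     # scanning from the last row to the first and replacing on <= leaves the
--     # FIRST index with minimal row-sum in the accumulator.
--     best_i = None
--     best_s = None
--     for i in range(len(array2D) - 1, -1, -1):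
--         s = sum(array2D[i])
--         if best_s is None or s <= best_s:
--             best_i, best_s = i, s
--     return best_i
-- ===== Notes on version B (the rewrite author's own statement) =====
-- stated objective: alternative
-- what changed: A builds the full list of row sums, then calls min on it, then re-scans that list with a counter for the first equal element; B is a single backward accumulator pass over the row indices that keeps (index, sum) and replaces on <=, so the first minimal index survives, with no intermediate list and no min/re-scan passes.
import Mathlib
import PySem

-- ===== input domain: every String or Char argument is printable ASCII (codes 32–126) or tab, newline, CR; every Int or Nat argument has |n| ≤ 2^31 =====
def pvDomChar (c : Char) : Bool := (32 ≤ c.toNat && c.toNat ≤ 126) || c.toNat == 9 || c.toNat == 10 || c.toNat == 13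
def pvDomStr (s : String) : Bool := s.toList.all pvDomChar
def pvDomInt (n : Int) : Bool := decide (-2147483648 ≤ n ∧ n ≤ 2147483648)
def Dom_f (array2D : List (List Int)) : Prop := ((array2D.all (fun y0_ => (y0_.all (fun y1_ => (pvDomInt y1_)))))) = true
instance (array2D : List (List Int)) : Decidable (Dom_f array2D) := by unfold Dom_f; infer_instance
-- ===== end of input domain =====

-- B replaces A's three staged passes (build row-sum list, min() over it, re-scan for the
-- first equal element) by ONE backward accumulator pass over the row indices (replace on <=),
-- keeping no intermediate list.

-- ===== PORT A =====
-- the second for-loop of A: scan `lista` for the first element equal to c, counting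
def fScan : List Int → Int → Int → Int
  | [], _, _ => 0        -- loop falls through (Python would return None); unreachable: c = min(lista) ∈ lista
  | j :: t, c, count => if j = c then count else fScan t c (count + 1)

def f (array2D : List (List Int)) : Int :=
  let lista := array2D.foldl (fun acc i => acc ++ [i.sum]) []
  match PySem.List.min? lista (fun x => x) with
  | some c => fScan lista c 0
  | none => 0            -- min([]) raises ValueError; excluded by Pre_f

-- ===== PORT B =====
-- the loop body of B: replace the accumulator when best_s is None or s <= best_s
def fStep (array2D : List (List Int)) (b : Option (Int × Int)) (i : Int) : Option (Int × Int) :=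
  let s := (PySem.List.pyGetD array2D i []).sum
  match b with
  | none => some (i, s)
  | some (bi, bs) => if s ≤ bs then some (i, s) else some (bi, bs)

def f_alt (array2D : List (List Int)) : Int :=
  match (PySem.List.pyRange (PySem.List.len array2D - 1) (-1) (-1)).foldl (fStep array2D) none with
  | some (bi, _) => bi
  | none => 0            -- empty input: Python B returns None, not an int; excluded by Pre_f

-- ===== PRECONDITION & SPEC =====
-- Pre_f excludes exactly the empty list, on which Python A raises ValueError from min([])
-- (and B returns None, not an int).
def Pre_f (array2D : List (List Int)) : Prop := array2D ≠ []
instance (array2D : List (List Int)) : Decidable (Pre_f array2D) := by unfold Pre_f; infer_instance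
def pvWitness_f : List (List Int) := [[1, 2], [0, 3], [3]]

def Spec_f (array2D : List (List Int)) (out : Int) : Prop := out = f_alt array2D
instance (array2D : List (List Int)) (out : Int) : Decidable (Spec_f array2D out) := by unfold Spec_f; infer_instance

-- ===== CLAIM (what is proved, stated in full; the proofs are below) =====
def Claim_equal_f : Prop := ∀ (array2D : List (List Int)), Dom_f array2D → Pre_f array2D → Spec_f array2D (f array2D)

-- ===== LEMMAS AND PROOFS =====

-- A's scan is k + (index of the first occurrence of c)
lemma fScan_eq_idxOf (l : List Int) (c : Int) (h : c ∈ l) :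
    ∀ k : Int, fScan l c k = k + (l.idxOf c : Int) := by
  induction l with
  | nil => cases h
  | cons j t ih =>
    intro k
    by_cases hj : j = c
    · subst hj; simp [fScan, List.idxOf_cons_self]
    · have hc : c ∈ t := by
        rcases List.mem_cons.mp h with h' | h'
        · exact absurd h'.symm hj
        · exact h'
      have := ih hc (k + 1)
      simp [fScan, hj, this, List.idxOf_cons_ne _ hj]
      ring

lemma foldl_min_mem : ∀ (t : List Int) (x : Int), t.foldl min x ∈ x :: t := by
  intro t
  induction t with
  | nil => intro x; simp
  | cons y t ih =>
    intro x
    have h := ih (min x y)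
    simp only [List.foldl_cons]
    rcases List.mem_cons.mp h with h1 | h1
    · rw [h1]
      rcases min_choice x y with h2 | h2 <;> rw [h2] <;> simp
    · exact List.mem_cons_of_mem _ (List.mem_cons_of_mem _ h1)

lemma foldl_min_le : ∀ (t : List Int) (x z : Int), z ∈ x :: t → t.foldl min x ≤ z := by
  intro t
  induction t with
  | nil => intro x z h; simp at h; simp [h]
  | cons y t ih =>
    intro x z h
    simp only [List.foldl_cons]
    rcases List.mem_cons.mp h with h' | h'
    · subst h'
      calc t.foldl min (min z y) ≤ min z y := ih _ _ List.mem_cons_self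
        _ ≤ z := min_le_left _ _
    · rcases List.mem_cons.mp h' with h'' | h''
      · subst h''
        calc t.foldl min (min x z) ≤ min x z := ih _ _ List.mem_cons_self
          _ ≤ z := min_le_right _ _
      · exact ih _ _ (List.mem_cons_of_mem _ h'')

-- the running best of B combined with the best of an already-scanned prefix
def fMerge (p q : Option (Int × Int)) : Option (Int × Int) :=
  match p with
  | none => q
  | some (mi, ms) =>
    match q with
    | none => some (mi, ms)
    | some (bi, bs) => if ms ≤ bs then some (mi, ms) else some (bi, bs)

-- first-minimum (index, sum) of the first n rows
def fFm (array2D : List (List Int)) : Nat → Option (Int × Int)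
  | 0 => none
  | n + 1 => fMerge (fFm array2D n) (some ((n : Int), (array2D.getD n []).sum))

lemma fMerge_fStep (array2D : List (List Int)) (p st : Option (Int × Int)) (n : Nat) :
    fMerge p (fStep array2D st (n : Int))
      = fMerge (fMerge p (some ((n : Int), (array2D.getD n []).sum))) st := by
  rcases p with _ | ⟨mi, ms⟩ <;> rcases st with _ | ⟨bi, bs⟩ <;>
    repeat' (first
      | rfl
      | (exfalso; omega)
      | simp only [fStep, fMerge, PySem.List.pyGetD_natCast]
      | split_ifs)

-- the backward loop of B computes the first minimum of the first n rows, merged with the start state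
lemma fLoop_spec (array2D : List (List Int)) :
    ∀ (n : Nat) (st : Option (Int × Int)),
      (PySem.List.pyRange ((n : Int) - 1) (-1) (-1)).foldl (fStep array2D) st
        = fMerge (fFm array2D n) st := by
  intro n
  induction n with
  | zero =>
    intro st
    rw [PySem.List.pyRange_neg_one_eq_nil (by norm_num)]
    rfl
  | succ n ih =>
    intro st
    have h1 : ((n : Int) + 1) - 1 = (n : Int) := by ring
    rw [Nat.cast_succ, h1, PySem.List.pyRange_neg_one_cons (by omega), List.foldl_cons, ih,
      fMerge_fStep]
    rfl

-- the first minimum of the first n rows is (first index of the min row-sum, that min)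
lemma fFm_eq (array2D : List (List Int)) :
    ∀ (n : Nat), n ≤ array2D.length → 1 ≤ n →
      ∀ (x : Int) (t : List Int), (array2D.take n).map List.sum = x :: t →
        fFm array2D n = some ((((x :: t).idxOf (t.foldl min x) : Nat) : Int), t.foldl min x) := by
  intro n
  induction n with
  | zero => intro _ h2; omega
  | succ n ih =>
    intro hlen _ x t heq
    have hn : n < array2D.length := by omega
    have htake : (array2D.take (n + 1)).map List.sum
        = (array2D.take n).map List.sum ++ [(array2D[n]).sum] := by
      rw [List.take_add_one, List.getElem?_eq_getElem hn, Option.toList_some, List.map_append]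
      rfl
    rcases Nat.eq_zero_or_pos n with rfl | hpos
    · -- first row
      simp only [List.take_zero, List.map_nil, List.nil_append] at htake
      rw [htake] at heq
      obtain ⟨rfl, rfl⟩ : x = (array2D[0]).sum ∧ t = ([] : List Int) := by
        cases heq; exact ⟨rfl, rfl⟩
      simp [fFm, fMerge, List.getD_eq_getElem?_getD, List.getElem?_eq_getElem hn]
    · -- n ≥ 1: previous prefix is nonempty
      have hlen' : ((array2D.take n).map List.sum).length = n := by
        simp [List.length_take, Nat.min_eq_left (le_of_lt hn)]
      obtain ⟨x', t', hprev⟩ : ∃ x' t', (array2D.take n).map List.sum = x' :: t' := by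
        cases hp : (array2D.take n).map List.sum with
        | nil => rw [hp] at hlen'; simp at hlen'; omega
        | cons a b => exact ⟨a, b, rfl⟩
      have hih := ih (le_of_lt hn) hpos x' t' hprev
      set y : Int := (array2D[n]).sum with hy
      have heq' : x :: t = x' :: (t' ++ [y]) := by
        rw [← heq, htake, hprev]; rfl
      obtain ⟨rfl, rfl⟩ : x = x' ∧ t = t' ++ [y] := by cases heq'; exact ⟨rfl, rfl⟩
      set M : Int := t'.foldl min x with hM
      have hfold : (t' ++ [y]).foldl min x = min M y := by
        rw [List.foldl_append]; rfl
      have hgetD : (array2D.getD n []) = array2D[n] := by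
        simp [List.getD_eq_getElem?_getD, List.getElem?_eq_getElem hn]
      have hMmem : M ∈ x :: t' := foldl_min_mem t' x
      have hstep : fFm array2D (n + 1)
          = fMerge (some (((x :: t').idxOf M : Int), M)) (some ((n : Int), y)) := by
        rw [fFm, hih, hgetD]
      by_cases hMy : M ≤ y
      · have hidx : (x :: (t' ++ [y])).idxOf (min M y)
            = (x :: t').idxOf M := by
          rw [min_eq_left hMy]
          have : x :: (t' ++ [y]) = (x :: t') ++ [y] := by simp
          rw [this, List.idxOf_append, if_pos hMmem]
        rw [hfold, hstep, hidx]
        simp [fMerge, hMy]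
      · have hylt : y < M := lt_of_not_ge hMy
        have hynot : y ∉ x :: t' := fun hc => absurd (foldl_min_le t' x y hc) (not_le.mpr hylt)
        have hidx : (x :: (t' ++ [y])).idxOf (min M y) = n := by
          rw [min_eq_right (le_of_lt hylt)]
          have hsplit : x :: (t' ++ [y]) = (x :: t') ++ [y] := by simp
          rw [hsplit, List.idxOf_append, if_neg hynot]
          have : (x :: t').length = n := by
            have := hlen'; rw [hprev] at this; simpa using this
          simp [this, List.idxOf_cons_self]
        rw [hfold, hstep, hidx]
        simp [fMerge, hMy, min_eq_right (le_of_lt hylt)]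

-- ===== VERDICT (by name: the statement is the Claim_ definition above) =====
theorem f_spec : Claim_equal_f := by
  intro array2D _ hpre
  obtain ⟨r, rs, rfl⟩ := List.exists_cons_of_ne_nil hpre
  show f (r :: rs) = f_alt (r :: rs)
  have hlista : (r :: rs).foldl (fun acc i => acc ++ [i.sum]) [] = (r :: rs).map List.sum := by
    simpa using PySem.List.foldl_append_singleton_eq_map List.sum (r :: rs) []
  set s : List Int := (r :: rs).map List.sum with hsdef
  set m : Int := (rs.map List.sum).foldl min r.sum with hmdef
  have hmmem : m ∈ s := by
    rw [hsdef, List.map_cons]; exact foldl_min_mem _ _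
  have hminA : PySem.List.min? s (fun x => x) = some m := by
    rw [hsdef, List.map_cons, PySem.List.min?_id_cons]
  have hA : f (r :: rs) = (s.idxOf m : Int) := by
    unfold f
    simp only [hlista, hminA]
    simpa using fScan_eq_idxOf s m hmmem 0
  have hB : f_alt (r :: rs) = (s.idxOf m : Int) := by
    unfold f_alt
    have hlen : PySem.List.len (r :: rs) - 1 = (((r :: rs).length : Nat) : Int) - 1 := by
      simp [PySem.List.len]
    rw [hlen, fLoop_spec]
    have hfm := fFm_eq (r :: rs) (r :: rs).length le_rfl (by simp) r.sum (rs.map List.sum)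
      (by simp)
    rw [hfm]
    have : s = r.sum :: rs.map List.sum := by simp [hsdef]
    rw [← hmdef, ← this]
    rfl
  rw [hA, hB]
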